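-- pv_equiv track=rewrite | github.com/hlainghtoo/Contained-Quantum-Conscious-Universe | main.py | _semantic_parse
-- ===== SOURCE A (Python) =====
-- def _semantic_parse(text_content):
--     """Basic keyword-based semantic parsing of messages."""
--     semantics = {"intent": "unknown", "emotion_hint": "neutral", "topic": "general"}
--     text_lower = text_content.lower()
--     if any(w in text_lower for w in ["hello", "hi", "greeting"]):
--         semantics["intent"] = "greeting"
--     elif any(w in text_lower for w in ["learned", "know", "pattern", "data"]):
--         semantics["intent"] = "knowledge_sharing"
--     elif any(w in text_lower for w in ["help", "assist", "request"]):
--         semantics["intent"] = "request"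
--     elif any(w in text_lower for w in ["angry", "hate", "ignore"]):
--         semantics["intent"] = "negative_social"
--     elif any(w in text_lower for w in ["happy", "good", "like"]):
--          semantics["intent"] = "positive_social"
--     if any(w in text_lower for w in ["happy", "joy", "glad"]):
--         semantics["emotion_hint"] = "positive"
--     elif any(w in text_lower for w in ["sad", "angry", "fear", "worry"]):
--         semantics["emotion_hint"] = "negative"
--     if "quantum" in text_lower or "qubit" in text_lower:
--         semantics["topic"] = "quantum"
--     elif "energy" in text_lower:
--         semantics["topic"] = "energy"
--     elif "social" in text_lower or "friend" in text_lower or "trust" in text_lower: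
--         semantics["topic"] = "social"
--     return semantics
-- ===== SOURCE B (Python) =====
-- # Single competitive pass over one flat rank-annotated rule table (rows in
-- # arbitrary, category-interleaved order): every matching row bids for its
-- # category and the smallest rank wins; defaults fill unclaimed categories.
-- _RULES = [
--     # (category, rank, label, keywords) -- row order is irrelevant:
--     # the winner per category is the matching row of smallest rank.
--     ("intent", 0, "greeting", ("hello", "hi", "greeting")),
--     ("emotion_hint", 0, "positive", ("happy", "joy", "glad")),
--     ("topic", 0, "quantum", ("quantum", "qubit")),
--     ("intent", 1, "knowledge_sharing", ("learned", "know", "pattern", "data")),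
--     ("emotion_hint", 1, "negative", ("sad", "angry", "fear", "worry")),
--     ("topic", 1, "energy", ("energy",)),
--     ("intent", 2, "request", ("help", "assist", "request")),
--     ("topic", 2, "social", ("social", "friend", "trust")),
--     ("intent", 3, "negative_social", ("angry", "hate", "ignore")),
--     ("intent", 4, "positive_social", ("happy", "good", "like")),
-- ]
-- _DEFAULTS = (("intent", "unknown"), ("emotion_hint", "neutral"), ("topic", "general"))
--
-- def _semantic_parse(text_content):
--     text_lower = text_content.lower()
--     best = {}
--     for cat, rank, label, kws in _RULES:
--         if (cat not in best or rank < best[cat][0]) and any(k in text_lower for k in kws):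
--             best[cat] = (rank, label)
--     return {cat: best[cat][1] if cat in best else d for cat, d in _DEFAULTS}
-- ===== Notes on version B (the rewrite author's own statement) =====
-- stated objective: alternative
-- what changed: Replaces the three independent if/elif first-match cascades by a single competitive pass over one flat rank-annotated rule table (rows interleaved across categories in arbitrary order): each matching row bids for its category, the smallest rank wins, and defaults are filled in only at assembly.
import Mathlib
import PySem

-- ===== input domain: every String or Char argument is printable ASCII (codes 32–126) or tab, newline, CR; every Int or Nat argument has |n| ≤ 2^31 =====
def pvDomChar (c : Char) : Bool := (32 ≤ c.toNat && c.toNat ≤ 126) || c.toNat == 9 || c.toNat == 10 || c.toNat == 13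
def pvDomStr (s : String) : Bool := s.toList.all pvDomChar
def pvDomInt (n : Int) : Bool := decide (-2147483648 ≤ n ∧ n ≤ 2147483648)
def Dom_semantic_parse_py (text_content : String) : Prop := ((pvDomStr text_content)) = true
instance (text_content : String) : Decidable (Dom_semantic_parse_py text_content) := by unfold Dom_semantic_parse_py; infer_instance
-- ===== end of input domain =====

-- B replaces A's three if/elif cascades by ONE competitive pass over a flat rank-annotated
-- rule table (rows category-interleaved; the smallest matching rank wins per category),
-- with defaults filled in at assembly (objective: alternative).

-- ===== PORT A =====
def semantic_parse_py (text_content : String) : List (String × String) :=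
  let semantics : PySem.Dict String String :=
    PySem.Dict.ofList [("intent", "unknown"), ("emotion_hint", "neutral"), ("topic", "general")]
  let text_lower := PySem.Str.lower text_content
  let semantics :=
    if (["hello", "hi", "greeting"].any fun w => PySem.Str.isIn w text_lower) then
      PySem.Dict.insert semantics "intent" "greeting"
    else if (["learned", "know", "pattern", "data"].any fun w => PySem.Str.isIn w text_lower) then
      PySem.Dict.insert semantics "intent" "knowledge_sharing"
    else if (["help", "assist", "request"].any fun w => PySem.Str.isIn w text_lower) then
      PySem.Dict.insert semantics "intent" "request"
    else if (["angry", "hate", "ignore"].any fun w => PySem.Str.isIn w text_lower) then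
      PySem.Dict.insert semantics "intent" "negative_social"
    else if (["happy", "good", "like"].any fun w => PySem.Str.isIn w text_lower) then
      PySem.Dict.insert semantics "intent" "positive_social"
    else semantics
  let semantics :=
    if (["happy", "joy", "glad"].any fun w => PySem.Str.isIn w text_lower) then
      PySem.Dict.insert semantics "emotion_hint" "positive"
    else if (["sad", "angry", "fear", "worry"].any fun w => PySem.Str.isIn w text_lower) then
      PySem.Dict.insert semantics "emotion_hint" "negative"
    else semantics
  let semantics :=
    if (PySem.Str.isIn "quantum" text_lower || PySem.Str.isIn "qubit" text_lower) then
      PySem.Dict.insert semantics "topic" "quantum"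
    else if PySem.Str.isIn "energy" text_lower then
      PySem.Dict.insert semantics "topic" "energy"
    else if (PySem.Str.isIn "social" text_lower || PySem.Str.isIn "friend" text_lower
              || PySem.Str.isIn "trust" text_lower) then
      PySem.Dict.insert semantics "topic" "social"
    else semantics
  semantics.items

-- ===== PORT B =====
-- flat rank-annotated rule table; row order is irrelevant (smallest rank wins per category)
def pvRules : List (String × Int × String × List String) :=
  [("intent", 0, "greeting", ["hello", "hi", "greeting"]),
   ("emotion_hint", 0, "positive", ["happy", "joy", "glad"]),
   ("topic", 0, "quantum", ["quantum", "qubit"]),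
   ("intent", 1, "knowledge_sharing", ["learned", "know", "pattern", "data"]),
   ("emotion_hint", 1, "negative", ["sad", "angry", "fear", "worry"]),
   ("topic", 1, "energy", ["energy"]),
   ("intent", 2, "request", ["help", "assist", "request"]),
   ("topic", 2, "social", ["social", "friend", "trust"]),
   ("intent", 3, "negative_social", ["angry", "hate", "ignore"]),
   ("intent", 4, "positive_social", ["happy", "good", "like"])]

def pvDefaults : List (String × String) :=
  [("intent", "unknown"), ("emotion_hint", "neutral"), ("topic", "general")]

-- the loop body of B's single pass (a named helper for the proof; same computation)
def pvStep (text_lower : String) (best : PySem.Dict String (Int × String))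
    (r : String × Int × String × List String) : PySem.Dict String (Int × String) :=
  if (!(best.contains r.1) || decide (r.2.1 < (best.getD r.1 (0, "")).1))
      && r.2.2.2.any (fun k => PySem.Str.isIn k text_lower) then
    best.insert r.1 (r.2.1, r.2.2.1)
  else best

def semantic_parse_py_alt (text_content : String) : List (String × String) :=
  let text_lower := PySem.Str.lower text_content
  let best := pvRules.foldl (pvStep text_lower) PySem.Dict.empty
  pvDefaults.map (fun cd =>
    (cd.1, match best.get? cd.1 with
           | some rl => rl.2
           | none => cd.2))

-- ===== PRECONDITION & SPEC =====
def Spec_semantic_parse_py (text_content : String) (out : List (String × String)) : Prop := out = semantic_parse_py_alt text_content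
instance (text_content : String) (out : List (String × String)) : Decidable (Spec_semantic_parse_py text_content out) := by unfold Spec_semantic_parse_py; infer_instance

-- ===== CLAIM (what is proved, stated in full; the proofs are below) =====
def Claim_equal_semantic_parse_py : Prop := ∀ (text_content : String), Dom_semantic_parse_py text_content → Spec_semantic_parse_py text_content (semantic_parse_py text_content)

-- ===== LEMMAS AND PROOFS =====

-- scalar shadow of pvStep: how one row updates the entry of a fixed category c
def pvStepS (text_lower : String) (c : String) (s : Option (Int × String))
    (r : String × Int × String × List String) : Option (Int × String) :=
  if r.1 = c then
    (if (!(s.isSome) || decide (r.2.1 < (s.getD (0, "")).1))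
        && r.2.2.2.any (fun k => PySem.Str.isIn k text_lower) then
      some (r.2.1, r.2.2.1)
    else s)
  else s

theorem pvStep_proj (tl c : String) (best : PySem.Dict String (Int × String))
    (r : String × Int × String × List String) :
    (pvStep tl best r).get? c = pvStepS tl c (best.get? c) r := by
  unfold pvStep pvStepS
  by_cases h : r.1 = c
  · subst h
    rw [PySem.Dict.contains_eq_isSome_get?, PySem.Dict.getD_eq_get?_getD, if_pos rfl]
    split_ifs with h1
    · exact PySem.Dict.get?_insert_self best r.1 (r.2.1, r.2.2.1)
    · rfl
  · rw [if_neg h]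
    split_ifs with h1
    · exact PySem.Dict.get?_insert_of_ne best (r.2.1, r.2.2.1) (fun hc => h hc.symm)
    · rfl

theorem pvFold_proj (tl c : String) (rows : List (String × Int × String × List String))
    (best : PySem.Dict String (Int × String)) :
    (rows.foldl (pvStep tl) best).get? c = rows.foldl (pvStepS tl c) (best.get? c) := by
  induction rows generalizing best with
  | nil => rfl
  | cons r rs ih => simp only [List.foldl_cons, ih, pvStep_proj]

-- ===== VERDICT (by name: the statement is the Claim_ definition above) =====
set_option maxHeartbeats 2000000 in
theorem semantic_parse_py_spec : Claim_equal_semantic_parse_py := by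
  intro t _
  unfold Spec_semantic_parse_py semantic_parse_py semantic_parse_py_alt pvRules pvDefaults
  simp only [List.map]
  rw [pvFold_proj, pvFold_proj, pvFold_proj]
  simp only [PySem.Dict.get?_empty, List.foldl_cons, List.foldl_nil, pvStepS,
    List.any_cons, List.any_nil, Bool.or_false, Bool.or_assoc,
    String.reduceEq, if_true, if_false]
  generalize (PySem.Str.isIn "hello" (PySem.Str.lower t) || (PySem.Str.isIn "hi" (PySem.Str.lower t) || PySem.Str.isIn "greeting" (PySem.Str.lower t))) = b1
  generalize (PySem.Str.isIn "learned" (PySem.Str.lower t) || (PySem.Str.isIn "know" (PySem.Str.lower t) || (PySem.Str.isIn "pattern" (PySem.Str.lower t) || PySem.Str.isIn "data" (PySem.Str.lower t)))) = b2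
  generalize (PySem.Str.isIn "help" (PySem.Str.lower t) || (PySem.Str.isIn "assist" (PySem.Str.lower t) || PySem.Str.isIn "request" (PySem.Str.lower t))) = b3
  generalize (PySem.Str.isIn "angry" (PySem.Str.lower t) || (PySem.Str.isIn "hate" (PySem.Str.lower t) || PySem.Str.isIn "ignore" (PySem.Str.lower t))) = b4
  generalize (PySem.Str.isIn "happy" (PySem.Str.lower t) || (PySem.Str.isIn "good" (PySem.Str.lower t) || PySem.Str.isIn "like" (PySem.Str.lower t))) = b5
  generalize (PySem.Str.isIn "happy" (PySem.Str.lower t) || (PySem.Str.isIn "joy" (PySem.Str.lower t) || PySem.Str.isIn "glad" (PySem.Str.lower t))) = b6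
  generalize (PySem.Str.isIn "sad" (PySem.Str.lower t) || (PySem.Str.isIn "angry" (PySem.Str.lower t) || (PySem.Str.isIn "fear" (PySem.Str.lower t) || PySem.Str.isIn "worry" (PySem.Str.lower t)))) = b7
  generalize (PySem.Str.isIn "quantum" (PySem.Str.lower t) || PySem.Str.isIn "qubit" (PySem.Str.lower t)) = b8
  generalize PySem.Str.isIn "energy" (PySem.Str.lower t) = b9
  generalize (PySem.Str.isIn "social" (PySem.Str.lower t) || (PySem.Str.isIn "friend" (PySem.Str.lower t) || PySem.Str.isIn "trust" (PySem.Str.lower t))) = b10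
  revert b1 b2 b3 b4 b5 b6 b7 b8 b9 b10
  decide
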